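-- pv_equiv track=rewrite | github.com/rmehta1987/flyteTest | src/flytetest/slurm_monitor.py | _parse_batch_sacct_output
-- ===== SOURCE A (Python) =====
-- def _parse_batch_sacct_output(stdout: str) -> dict[str, dict[str, str]]:
--     """Parse pipe-delimited ``sacct --format=JobID,State,ExitCode`` output.
--
--     One job may appear on multiple rows (e.g. ``123``, ``123.batch``,
--     ``123.0``).  The function prefers the bare job-ID row over step rows.
--     When no bare row is present it falls back to the first non-header row
--     for that job.
--
--     Args:
--         stdout: Raw standard output from the ``sacct`` invocation.
--
--     Returns:
--         A mapping from bare job ID (string) to a dict of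
--         ``{"JobID": ..., "State": ..., "ExitCode": ...}``.
--     """
--     # first pass: collect all rows keyed by their JobID token
--     rows: list[dict[str, str]] = []
--     for line in stdout.splitlines():
--         stripped = line.strip()
--         if not stripped or "|" not in stripped:
--             continue
--         parts = stripped.split("|")
--         if len(parts) < 3:
--             continue
--         row = {"JobID": parts[0], "State": parts[1], "ExitCode": parts[2]}
--         # Skip the header row.
--         if parts[0].upper() == "JOBID":
--             continue
--         rows.append(row)
--
--     # second pass: gather per-bare-job best rows
--     result: dict[str, dict[str, str]] = {}
--     for row in rows:
--         token = row["JobID"]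
--         bare_id = token.split(".")[0]  # drop ".batch", ".0" step suffixes
--         if bare_id not in result:
--             result[bare_id] = row
--             continue
--         # Prefer the exact-match (bare) row over step rows.
--         if token == bare_id:
--             result[bare_id] = row
--     return result
-- ===== SOURCE B (Python) =====
-- def _best_row(bare_id: str, rows: list) -> dict:
--     """Last row whose JobID token equals bare_id, else the first row."""
--     chosen = rows[0]
--     for row in rows:
--         if row["JobID"] == bare_id:
--             chosen = row
--     return chosen
--
--
-- def _parse_batch_sacct_output(stdout: str) -> dict:
--     # Single filtering pass grouping rows by bare job id, then a selection pass.
--     groups: dict = {}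
--     for line in stdout.splitlines():
--         stripped = line.strip()
--         if not stripped or "|" not in stripped:
--             continue
--         parts = stripped.split("|")
--         if len(parts) < 3 or parts[0].upper() == "JOBID":
--             continue
--         bare_id = parts[0].split(".")[0]
--         groups.setdefault(bare_id, []).append(
--             {"JobID": parts[0], "State": parts[1], "ExitCode": parts[2]}
--         )
--     return {bare: _best_row(bare, rows) for bare, rows in groups.items()}
-- ===== Notes on version B (the rewrite author's own statement) =====
-- stated objective: alternative
-- what changed: B groups all matching rows per bare job id in one filtering pass (dict of lists via setdefault) and then selects per group (last bare-token row, else first row), instead of A's separate rows list plus a greedy overwrite-on-the-fly second pass.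
import Mathlib
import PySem

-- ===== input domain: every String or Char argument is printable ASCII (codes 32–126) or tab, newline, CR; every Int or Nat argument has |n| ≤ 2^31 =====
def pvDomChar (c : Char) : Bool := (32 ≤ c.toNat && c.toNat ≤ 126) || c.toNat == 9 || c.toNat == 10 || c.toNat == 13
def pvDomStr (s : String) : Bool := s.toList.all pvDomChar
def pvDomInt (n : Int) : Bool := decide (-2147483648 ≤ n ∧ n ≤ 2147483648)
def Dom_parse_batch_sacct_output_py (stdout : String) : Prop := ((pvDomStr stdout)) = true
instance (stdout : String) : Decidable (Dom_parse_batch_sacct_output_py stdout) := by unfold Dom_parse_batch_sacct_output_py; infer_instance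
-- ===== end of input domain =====

-- B groups the filtered rows per bare job id in one pass and then selects per group
-- (last bare-token row, else the group's first row); A keeps a flat rows list and
-- greedily overwrites its result dict. Equivalence of the two decompositions is proved.

-- ===== PORT A =====
-- Literal port of A. Rows {"JobID":…,"State":…,"ExitCode":…} are PySem.Dicts; the
-- returned dict-of-dicts is rendered as its items list per the type convention.
def parse_batch_sacct_output_py (stdout : String) : List (String × List (String × String)) :=
  let rows : List (PySem.Dict String String) :=
    (PySem.Str.splitlines stdout).foldl (fun rows line =>
      let stripped := PySem.Str.strip line
      if stripped = "" || !(PySem.Str.isIn "|" stripped) then rows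
      else
        let parts := (PySem.Str.split? stripped "|").getD []   -- "|" ≠ "", so split? is some
        if parts.length < 3 then rows
        else
          let row := (((PySem.Dict.empty).insert "JobID" (PySem.List.pyGetD parts 0 "")).insert
              "State" (PySem.List.pyGetD parts 1 "")).insert "ExitCode" (PySem.List.pyGetD parts 2 "")
          if PySem.Str.upper (PySem.List.pyGetD parts 0 "") = "JOBID" then rows
          else rows ++ [row]) []
  let result : PySem.Dict String (PySem.Dict String String) :=
    rows.foldl (fun result row =>
      let token := row.getD "JobID" ""   -- row["JobID"]; the key is always present
      let bare := PySem.List.pyGetD ((PySem.Str.split? token ".").getD []) 0 ""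
      if !(result.contains bare) then result.insert bare row
      else if token = bare then result.insert bare row
      else result) PySem.Dict.empty
  result.items.map (fun p => (p.1, p.2.items))

-- ===== PORT B =====
-- helper _best_row: last row whose JobID token equals bare_id, else the first row.
-- rows[0] cannot raise (group lists are non-empty), so headD stands in for rows[0].
def best_row_py (bare_id : String) (rows : List (PySem.Dict String String)) :
    PySem.Dict String String :=
  rows.foldl (fun chosen row => if row.getD "JobID" "" = bare_id then row else chosen)
    (rows.headD PySem.Dict.empty)

def parse_batch_sacct_output_py_alt (stdout : String) : List (String × List (String × String)) :=
  let groups : PySem.Dict String (List (PySem.Dict String String)) :=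
    (PySem.Str.splitlines stdout).foldl (fun groups line =>
      let stripped := PySem.Str.strip line
      if stripped = "" || !(PySem.Str.isIn "|" stripped) then groups
      else
        let parts := (PySem.Str.split? stripped "|").getD []
        if parts.length < 3 || PySem.Str.upper (PySem.List.pyGetD parts 0 "") = "JOBID" then groups
        else
          let bare_id := PySem.List.pyGetD
              ((PySem.Str.split? (PySem.List.pyGetD parts 0 "") ".").getD []) 0 ""
          let row := (((PySem.Dict.empty).insert "JobID" (PySem.List.pyGetD parts 0 "")).insert
              "State" (PySem.List.pyGetD parts 1 "")).insert "ExitCode" (PySem.List.pyGetD parts 2 "")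
          groups.modify bare_id [] (fun rs => rs ++ [row])) PySem.Dict.empty   -- setdefault(...).append
  -- final dict comprehension: group keys are distinct, so it is this map
  groups.items.map (fun p => (p.1, (best_row_py p.1 p.2).items))

-- ===== PRECONDITION & SPEC =====
def Spec_parse_batch_sacct_output_py (stdout : String) (out : List (String × List (String × String))) : Prop := out = parse_batch_sacct_output_py_alt stdout
instance (stdout : String) (out : List (String × List (String × String))) : Decidable (Spec_parse_batch_sacct_output_py stdout out) := by unfold Spec_parse_batch_sacct_output_py; infer_instance

-- ===== CLAIM (what is proved, stated in full; the proofs are below) =====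
def Claim_equal_parse_batch_sacct_output_py : Prop := ∀ (stdout : String), Dom_parse_batch_sacct_output_py stdout → Spec_parse_batch_sacct_output_py stdout (parse_batch_sacct_output_py stdout)

-- ===== LEMMAS AND PROOFS =====

-- Shared per-line parse: `some (bare_id, row)` iff the line survives the filters.
def pvParseLine (line : String) : Option (String × PySem.Dict String String) :=
  let stripped := PySem.Str.strip line
  if stripped = "" || !(PySem.Str.isIn "|" stripped) then none
  else
    let parts := (PySem.Str.split? stripped "|").getD []
    if parts.length < 3 then none
    else if PySem.Str.upper (PySem.List.pyGetD parts 0 "") = "JOBID" then none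
    else some (PySem.List.pyGetD ((PySem.Str.split? (PySem.List.pyGetD parts 0 "") ".").getD []) 0 "",
      (((PySem.Dict.empty).insert "JobID" (PySem.List.pyGetD parts 0 "")).insert
          "State" (PySem.List.pyGetD parts 1 "")).insert "ExitCode" (PySem.List.pyGetD parts 2 ""))

-- any parsed pair satisfies: A's recomputation of the bare id from the row gives the pair's key
lemma pvParseLine_bare (l : String) (b : String) (r : PySem.Dict String String)
    (h : pvParseLine l = some (b, r)) :
    PySem.List.pyGetD ((PySem.Str.split? (r.getD "JobID" "") ".").getD []) 0 "" = b := by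
  simp only [pvParseLine] at h
  split_ifs at h with h1 h2 h3
  simp only [Option.some.injEq, Prod.mk.injEq] at h
  obtain ⟨hb, hr⟩ := h
  subst hb; subst hr
  simp [PySem.Dict.getD_insert_of_ne, PySem.Dict.getD_insert_self]

-- A's per-line step, branch for branch, is pvParseLine followed by an append
lemma pvStepA_eq :
    (fun (rows : List (PySem.Dict String String)) line =>
      let stripped := PySem.Str.strip line
      if stripped = "" || !(PySem.Str.isIn "|" stripped) then rows
      else
        let parts := (PySem.Str.split? stripped "|").getD []
        if parts.length < 3 then rows
        else
          let row := (((PySem.Dict.empty).insert "JobID" (PySem.List.pyGetD parts 0 "")).insert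
              "State" (PySem.List.pyGetD parts 1 "")).insert "ExitCode" (PySem.List.pyGetD parts 2 "")
          if PySem.Str.upper (PySem.List.pyGetD parts 0 "") = "JOBID" then rows
          else rows ++ [row])
    = (fun rows line => match pvParseLine line with
        | none => rows
        | some p => rows ++ [p.2]) := by
  funext rows line
  simp only [pvParseLine]
  split_ifs <;> rfl

-- B's per-line step, branch for branch, is pvParseLine followed by the group update
lemma pvStepB_eq :
    (fun (groups : PySem.Dict String (List (PySem.Dict String String))) line =>
      let stripped := PySem.Str.strip line
      if stripped = "" || !(PySem.Str.isIn "|" stripped) then groups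
      else
        let parts := (PySem.Str.split? stripped "|").getD []
        if parts.length < 3 || PySem.Str.upper (PySem.List.pyGetD parts 0 "") = "JOBID" then groups
        else
          let bare_id := PySem.List.pyGetD
              ((PySem.Str.split? (PySem.List.pyGetD parts 0 "") ".").getD []) 0 ""
          let row := (((PySem.Dict.empty).insert "JobID" (PySem.List.pyGetD parts 0 "")).insert
              "State" (PySem.List.pyGetD parts 1 "")).insert "ExitCode" (PySem.List.pyGetD parts 2 "")
          groups.modify bare_id [] (fun rs => rs ++ [row]))
    = (fun groups line => match pvParseLine line with
        | none => groups
        | some p => groups.modify p.1 [] (fun rs => rs ++ [p.2])) := by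
  funext groups line
  simp only [pvParseLine]
  by_cases h1 : (PySem.Str.strip line = "" || !(PySem.Str.isIn "|" (PySem.Str.strip line))) = true
  · simp only [h1, if_true]
  · simp only [Bool.not_eq_true] at *
    simp only [h1, Bool.false_eq_true, if_false]
    by_cases h2 : ((PySem.Str.split? (PySem.Str.strip line) "|").getD []).length < 3
    · simp [h2]
    · by_cases h3 : PySem.Str.upper (PySem.List.pyGetD ((PySem.Str.split? (PySem.Str.strip line) "|").getD []) 0 "") = "JOBID"
      · simp [h2, h3]
      · simp [h2, h3]

-- folding A's matched step over the lines collects the parsed rows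
lemma pvFoldA (lines : List String) (acc : List (PySem.Dict String String)) :
    lines.foldl (fun rows line => match pvParseLine line with
        | none => rows
        | some p => rows ++ [p.2]) acc
      = acc ++ (lines.filterMap pvParseLine).map (·.2) := by
  induction lines generalizing acc with
  | nil => simp
  | cons l ls ih =>
    simp only [List.foldl_cons, List.filterMap_cons]
    cases h : pvParseLine l <;> simp [ih]

-- folding B's matched step over the lines is the grouping fold over the parsed pairs
lemma pvFoldB (lines : List String) (g : PySem.Dict String (List (PySem.Dict String String))) :
    lines.foldl (fun groups line => match pvParseLine line with
        | none => groups
        | some p => groups.modify p.1 [] (fun rs => rs ++ [p.2])) g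
      = (lines.filterMap pvParseLine).foldl
          (fun g p => g.modify p.1 [] (fun rs => rs ++ [p.2])) g := by
  induction lines generalizing g with
  | nil => rfl
  | cons l ls ih =>
    simp only [List.foldl_cons, List.filterMap_cons]
    cases h : pvParseLine l <;> simp [ih]

-- membership in the keys of the grouping fold
lemma pvContainsG (P : List (String × PySem.Dict String String))
    (g : PySem.Dict String (List (PySem.Dict String String))) (b : String) :
    (P.foldl (fun g p => g.modify p.1 [] (fun rs => rs ++ [p.2])) g).contains b
      = (g.contains b || decide (b ∈ P.map (·.1))) := by
  induction P generalizing g with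
  | nil => simp
  | cons p P ih =>
    simp only [List.foldl_cons, ih, PySem.Dict.contains_modify, List.map_cons, List.mem_cons]
    by_cases hb : b = p.1
    · simp [hb]
    · simp [beq_false_of_ne hb, hb]

-- a key present in the grouping fold has a non-empty group
lemma pvGrpNonempty (P : List (String × PySem.Dict String String)) (b : String)
    (h : b ∈ P.map (·.1)) :
    (P.foldl (fun g p => g.modify p.1 [] (fun rs => rs ++ [p.2]))
        (PySem.Dict.empty (κ := String))).getD b [] ≠ [] := by
  rw [PySem.Dict.getD_foldl_modify_append]
  obtain ⟨p, hp, hpb⟩ := List.mem_map.mp h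
  have : p ∈ P.filter (fun q => q.1 == b) := by
    rw [List.mem_filter]
    exact ⟨hp, by simp [hpb]⟩
  simp only [PySem.Dict.getD_empty, List.nil_append]
  exact fun hnil => by simpa [hnil] using List.mem_map_of_mem (f := (·.2)) this

lemma pvBest_append_self (b : String) (rs : List (PySem.Dict String String))
    (r : PySem.Dict String String) (h : r.getD "JobID" "" = b) :
    best_row_py b (rs ++ [r]) = r := by
  simp [best_row_py, List.foldl_append, h]

lemma pvBest_append_ne (b : String) (rs : List (PySem.Dict String String))
    (r : PySem.Dict String String) (h : ¬ r.getD "JobID" "" = b) (hne : rs ≠ []) :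
    best_row_py b (rs ++ [r]) = best_row_py b rs := by
  cases rs with
  | nil => exact absurd rfl hne
  | cons x xs => simp [best_row_py, List.foldl_append, h]

lemma pvBest_single (b : String) (r : PySem.Dict String String) :
    best_row_py b [r] = r := by
  simp [best_row_py]

-- the main correspondence: A's greedy second pass = selection over B's groups
lemma pvMain (P : List (String × PySem.Dict String String))
    (hP : ∀ p ∈ P, PySem.List.pyGetD ((PySem.Str.split? (p.2.getD "JobID" "") ".").getD []) 0 "" = p.1) :
    ((P.map (·.2)).foldl (fun result row =>
      let token := row.getD "JobID" ""
      let bare := PySem.List.pyGetD ((PySem.Str.split? token ".").getD []) 0 ""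
      if !(result.contains bare) then result.insert bare row
      else if token = bare then result.insert bare row
      else result) PySem.Dict.empty).items
    = ((P.foldl (fun g p => g.modify p.1 [] (fun rs => rs ++ [p.2])) PySem.Dict.empty).items).map
        (fun q => (q.1, best_row_py q.1 q.2)) := by
  induction P using List.reverseRecOn with
  | nil => rfl
  | append_singleton Q p IH =>
    have hp : PySem.List.pyGetD ((PySem.Str.split? (p.2.getD "JobID" "") ".").getD []) 0 "" = p.1 :=
      hP p (by simp)
    have IH' := IH (fun q hq => hP q (List.mem_append_left _ hq))
    rw [List.map_append, List.foldl_append, List.foldl_append]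
    simp only [List.map_cons, List.map_nil, List.foldl_cons, List.foldl_nil]
    rw [hp]
    set G := Q.foldl (fun g p => g.modify p.1 [] (fun rs => rs ++ [p.2]))
        (PySem.Dict.empty (κ := String) (ν := List (PySem.Dict String String))) with hG
    set R := (Q.map (·.2)).foldl (fun result row =>
      let token := row.getD "JobID" ""
      let bare := PySem.List.pyGetD ((PySem.Str.split? token ".").getD []) 0 ""
      if !(result.contains bare) then result.insert bare row
      else if token = bare then result.insert bare row
      else result) (PySem.Dict.empty (κ := String) (ν := PySem.Dict String String)) with hR
    have hkeys : ∀ b, R.contains b = G.contains b := by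
      intro b
      rw [PySem.Dict.contains_eq_decide_mem_keys, PySem.Dict.contains_eq_decide_mem_keys]
      simp [PySem.Dict.keys, IH', List.map_map, Function.comp_def]
    by_cases hc : G.contains p.1 = true
    · -- the bare id already has a group
      have hcR : R.contains p.1 = true := (hkeys p.1).trans hc
      have hnodup : G.keys.Nodup := PySem.Dict.nodup_keys_foldl_modify_key Q (·.1) []
        (fun _ q => (fun rs => rs ++ [q.2])) _ (by simp [PySem.Dict.keys, PySem.Dict.empty])
      have hmem : p.1 ∈ Q.map (·.1) := by
        have := pvContainsG Q PySem.Dict.empty p.1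
        rw [← hG] at this
        simpa [PySem.Dict.contains_empty, hc] using this.symm.trans hc
      have hgrp : G.getD p.1 [] ≠ [] := by rw [hG]; exact pvGrpNonempty Q p.1 hmem
      by_cases ht : p.2.getD "JobID" "" = p.1
      · -- bare row: A overwrites, B's selection picks the appended row
        simp only [hcR, Bool.not_true, Bool.false_eq_true, if_false, ht, if_true]
        rw [PySem.Dict.items_insert_of_contains _ _ hcR]
        simp only [PySem.Dict.modify]
        rw [PySem.Dict.items_insert_of_contains _ _ hc, IH', List.map_map, List.map_map]
        refine List.map_congr_left (fun q hq => ?_)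
        by_cases hqb : q.1 = p.1
        · simp only [Function.comp, hqb, beq_self_eq_true, if_true]
          rw [pvBest_append_self _ _ _ ht]
        · simp [Function.comp, hqb, beq_iff_eq]
      · -- step row for an existing group: A keeps its entry, B's selection ignores it
        simp only [hcR, Bool.not_true, Bool.false_eq_true, if_false, ht, IH', PySem.Dict.modify]
        rw [PySem.Dict.items_insert_of_contains _ _ hc, List.map_map]
        refine List.map_congr_left (fun q hq => ?_)
        by_cases hqb : q.1 = p.1
        · have hqv : q.2 = G.getD p.1 [] := by
            rw [← hqb]
            exact (PySem.Dict.getD_of_mem_items G (by simpa using hq) hnodup []).symm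
          simp only [Function.comp, hqb, beq_self_eq_true, if_true]
          rw [← hqv] at hgrp ⊢
          rw [pvBest_append_ne _ _ _ ht hgrp]
        · simp [Function.comp, hqb, beq_iff_eq]
    · -- a fresh bare id: both append a new entry
      have hcR : R.contains p.1 = false := by
        rw [hkeys p.1]
        exact Bool.not_eq_true _ ▸ (by simpa using hc)
      have hgd : G.getD p.1 [] = [] :=
        PySem.Dict.getD_of_not_contains G [] (by simpa using hc)
      simp only [hcR, Bool.not_false, if_true, PySem.Dict.modify]
      rw [PySem.Dict.items_insert_of_not_contains _ _ hcR,
        PySem.Dict.items_insert_of_not_contains _ _ (by simpa using hc), hgd]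
      simp only [List.map_append, IH', List.map_cons, List.map_nil, List.nil_append]
      rw [pvBest_single]

-- ===== VERDICT (by name: the statement is the Claim_ definition above) =====
theorem parse_batch_sacct_output_py_spec : Claim_equal_parse_batch_sacct_output_py := by
  intro stdout _
  unfold Spec_parse_batch_sacct_output_py parse_batch_sacct_output_py parse_batch_sacct_output_py_alt
  rw [pvStepA_eq, pvStepB_eq, pvFoldA, pvFoldB]
  rw [List.nil_append]
  dsimp only
  rw [pvMain _ (by
    intro p hp
    obtain ⟨l, _, hl⟩ := List.mem_filterMap.mp hp
    exact pvParseLine_bare l p.1 p.2 (by simpa using hl))]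
  simp [List.map_map, Function.comp]
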